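-- pv_equiv track=rewrite | github.com/alyssating/CS101-APTs | APTQuiz2Practice/PopularEnding.py | popular
-- ===== SOURCE A (Python) =====
-- def popular(phrase):
--     '''
--     phrase is a string of words
--     Return the sorted list of unique words that have the most
--         popular 3-character ending. Only consider words of length
--         3 or more. Duplicate words only count once. Break ties with
--         the 3-character ending that comes last in alphabetical order.
--     '''
--
--     dict = {}
--     for word in list(set(phrase.split())):
--         if len(word) >= 3:
--             ending = word[-3:]
--             if ending not in dict:
--                 dict[ending] = 0
--             dict[ending] += 1
--     lst = sorted(sorted(dict.items(), reverse = True),key = lambda x: -x[1])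
--     if len(lst) > 0:
--         popEnding = lst[0][0]
--         ret = []
--         for word in phrase.split():
--             if word[-3:] == popEnding and word not in ret:
--                 ret.append(word)
--         return sorted(ret)
--     return []
-- ===== SOURCE B (Python) =====
-- def popular(phrase):
--     '''
--     Same task, different shape: instead of a counting dict plus a double
--     sort plus a second scan of the phrase, group the distinct words by
--     their 3-char ending in one dict of lists, pick the best ending with a
--     single max (count, then alphabetically last ending), and sort its
--     word list.
--     '''
--     groups = {}
--     for word in set(phrase.split()):
--         if len(word) >= 3:
--             groups.setdefault(word[-3:], []).append(word)
--     best = max(groups.items(), key=lambda kv: (len(kv[1]), kv[0]), default=None)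
--     if best is None:
--         return []
--     return sorted(best[1])
-- ===== Notes on version B (the rewrite author's own statement) =====
-- stated objective: simpler
-- what changed: Replaces the count dict + double sort + second scan of the phrase by one dict grouping distinct words by 3-char ending, a single max over its items with key (count, ending), and a sort of the winning group.
import Mathlib
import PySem

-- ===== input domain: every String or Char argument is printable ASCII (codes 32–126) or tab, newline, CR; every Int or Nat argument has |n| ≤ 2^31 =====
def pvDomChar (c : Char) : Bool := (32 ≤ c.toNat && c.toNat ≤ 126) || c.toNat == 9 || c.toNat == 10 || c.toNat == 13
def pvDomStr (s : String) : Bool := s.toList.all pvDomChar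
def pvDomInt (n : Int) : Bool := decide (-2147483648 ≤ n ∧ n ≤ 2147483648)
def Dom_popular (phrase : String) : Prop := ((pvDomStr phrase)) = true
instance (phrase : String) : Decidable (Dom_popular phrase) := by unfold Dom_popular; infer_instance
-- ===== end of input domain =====

-- B replaces A's count dict + double sort + second scan of the phrase by one grouping
-- dict (ending -> distinct words), a single max with key (count, ending) and a sort of
-- the winning group (objective: simpler).

-- ===== PORT A =====
-- word[-3:] (both Pythons use this expression)
def pvEnd3 (w : String) : String := PySem.Str.slice w (some (-3)) none

-- phrase.split()
def pvWords (phrase : String) : List String := PySem.Str.split₀ phrase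

-- A's first loop: dict of ending -> count over list(set(phrase.split()))
def popularDictA (u : List String) : PySem.Dict String Int :=
  u.foldl
    (fun d w =>
      if 3 ≤ PySem.Str.len w then
        (if d.contains (pvEnd3 w) then d else d.insert (pvEnd3 w) 0).modify (pvEnd3 w) 0 (· + 1)
      else d)
    PySem.Dict.empty

def popular (phrase : String) : List String :=
  let d := popularDictA (PySem.Set.ofList (pvWords phrase))
  let lst := PySem.List.sorted (PySem.List.sorted2 d.items (fun x => x.1) (fun x => x.2) true)
      (fun x => -x.2)
  match lst with
  | (popEnding, _) :: _ =>
      PySem.List.sorted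
        ((pvWords phrase).foldl
          (fun ret w => if (pvEnd3 w == popEnding) && !ret.contains w then ret ++ [w] else ret) [])
        (fun x => x)
  | [] => []

-- ===== PORT B =====
-- B's loop: dict of ending -> list of (distinct) words, over set(phrase.split())
def popularGroups (u : List String) : PySem.Dict String (List String) :=
  u.foldl
    (fun g w => if 3 ≤ PySem.Str.len w then g.modify (pvEnd3 w) [] (· ++ [w]) else g)
    PySem.Dict.empty

def popular_alt (phrase : String) : List String :=
  match PySem.List.max2? (popularGroups (PySem.Set.ofList (pvWords phrase))).items
      (fun p => p.2.length) (fun p => p.1) with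
  | none => []
  | some best => PySem.List.sorted best.2 (fun x => x)

-- ===== PRECONDITION & SPEC =====
def Spec_popular (phrase : String) (out : List String) : Prop := out = popular_alt phrase
instance (phrase : String) (out : List String) : Decidable (Spec_popular phrase out) := by unfold Spec_popular; infer_instance

-- ===== CLAIM (what is proved, stated in full; the proofs are below) =====
def Claim_equal_popular : Prop := ∀ (phrase : String), Dom_popular phrase → Spec_popular phrase (popular phrase)

-- ===== LEMMAS AND PROOFS =====

-- (e, l) ↦ (e, len l): the shape relation between B's grouping dict and A's count dict
def pvMapLen (l : List (String × List String)) : List (String × Int) :=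
  l.map (fun p => (p.1, (p.2.length : Int)))

-- the fold step of PySem.List.min? and of PySem.List.max2?, named (definitionally equal)
def pvMinStep {α κ : Type} [LinearOrder κ] (key : α → κ) (acc : Option α) (x : α) : Option α :=
  match acc with
  | none => some x
  | some m => if key x < key m then some x else some m

def pvMaxStep {α : Type} (k1 : α → Nat) (k2 : α → String) (acc : Option α) (x : α) : Option α :=
  match acc with
  | none => some x
  | some m =>
      if (decide (k1 m < k1 x) || (!decide (k1 x < k1 m) && decide (k2 m < k2 x))) = true
      then some x else some m

-- the head of a stable insertion sort is the FIRST minimal-key element (= PySem.List.min?)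
theorem pv_head?_foldl_insertBy {α κ : Type} [LinearOrder κ] (key : α → κ) (xs acc : List α) :
    (xs.foldl (fun a x => PySem.List.insertBy (fun a b => decide (key a < key b)) x a) acc).head? =
      xs.foldl (pvMinStep key) acc.head? := by
  induction xs generalizing acc with
  | nil => rfl
  | cons x xs ih =>
      simp only [List.foldl_cons]
      rw [ih]
      congr 1
      cases acc with
      | nil => rfl
      | cons y ys =>
          simp only [PySem.List.insertBy, List.head?_cons, pvMinStep]
          split <;> simp_all

theorem pv_head?_sorted_eq_min? {α κ : Type} [LinearOrder κ] (xs : List α) (key : α → κ) :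
    (PySem.List.sorted xs key false).head? = PySem.List.min? xs key := by
  simp only [PySem.List.sorted, PySem.List.min?, Bool.false_eq_true, if_false]
  exact pv_head?_foldl_insertBy key xs []

-- min? of pre ++ q :: suf is q when q beats pre strictly and suf weakly
theorem pv_min?_eq_of_strict {α κ : Type} [LinearOrder κ] (key : α → κ) (pre suf : List α) (q : α)
    (hpre : ∀ p ∈ pre, key q < key p) (hsuf : ∀ y ∈ suf, key q ≤ key y) :
    PySem.List.min? (pre ++ q :: suf) key = some q := by
  have step_mem : ∀ (l : List α) (acc : Option α),
      l.foldl (pvMinStep key) acc = acc ∨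
      ∃ p ∈ l, l.foldl (pvMinStep key) acc = some p := by
    intro l
    induction l with
    | nil => intro acc; exact Or.inl rfl
    | cons x l ih =>
        intro acc
        rcases ih (pvMinStep key acc x) with h | ⟨p, hp, h⟩
        · rw [List.foldl_cons, h]
          cases acc with
          | none => exact Or.inr ⟨x, List.mem_cons_self, rfl⟩
          | some m =>
              by_cases hlt : key x < key m
              · exact Or.inr ⟨x, List.mem_cons_self, by simp [pvMinStep, hlt]⟩
              · exact Or.inl (by simp [pvMinStep, hlt])
        · exact Or.inr ⟨p, List.mem_cons_of_mem _ hp, by rw [List.foldl_cons, h]⟩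
  have keep : ∀ (l : List α), (∀ y ∈ l, ¬ key y < key q) →
      l.foldl (pvMinStep key) (some q) = some q := by
    intro l
    induction l with
    | nil => intro _; rfl
    | cons y l ih =>
        intro h
        rw [List.foldl_cons]
        have hny : ¬ key y < key q := h y List.mem_cons_self
        simp only [pvMinStep, hny, if_false]
        exact ih (fun z hz => h z (List.mem_cons_of_mem _ hz))
  show (pre ++ q :: suf).foldl (pvMinStep key) none = some q
  rw [List.foldl_append, List.foldl_cons]
  rcases step_mem pre none with h | ⟨p, hp, h⟩
  · rw [h]
    exact keep suf (fun y hy => not_lt.mpr (hsuf y hy))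
  · rw [h]
    simp only [pvMinStep, hpre p hp, if_true]
    exact keep suf (fun y hy => not_lt.mpr (hsuf y hy))

-- insertion sorts with comparators that agree on the list's elements coincide
theorem pv_foldl_insertBy_congr {α : Type} (b b' : α → α → Bool) (l : List α)
    (h : ∀ x ∈ l, ∀ y ∈ l, b x y = b' x y) (xs acc : List α)
    (hxs : ∀ x ∈ xs, x ∈ l) (hacc : ∀ y ∈ acc, y ∈ l) :
    xs.foldl (fun a x => PySem.List.insertBy b x a) acc =
      xs.foldl (fun a x => PySem.List.insertBy b' x a) acc := by
  have ins_congr : ∀ (x : α) (a : List α), x ∈ l → (∀ y ∈ a, y ∈ l) →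
      PySem.List.insertBy b x a = PySem.List.insertBy b' x a := by
    intro x a hx ha
    induction a with
    | nil => rfl
    | cons y ys ih =>
        simp only [PySem.List.insertBy]
        rw [h x hx y (ha y List.mem_cons_self)]
        split
        · rfl
        · rw [ih (fun z hz => ha z (List.mem_cons_of_mem _ hz))]
  induction xs generalizing acc with
  | nil => rfl
  | cons x xs ih =>
      simp only [List.foldl_cons]
      rw [ins_congr x acc (hxs x List.mem_cons_self) hacc]
      exact ih (PySem.List.insertBy b' x acc)
        (fun z hz => hxs z (List.mem_cons_of_mem _ hz))
        (fun y hy => by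
          rcases (PySem.List.mem_insertBy b' x y acc).mp hy with rfl | hy
          · exact hxs y List.mem_cons_self
          · exact hacc y hy)

-- on a list of pairs with pairwise-distinct first components, A's double-key reverse sort
-- is the reverse sort by the first component alone
theorem pv_sorted2_eq_sorted_fst (l : List (String × Int))
    (hn : ∀ x ∈ l, ∀ y ∈ l, x.1 = y.1 → x = y) :
    PySem.List.sorted2 l (fun x => x.1) (fun x => x.2) true =
      PySem.List.sorted l (fun x => x.1) true := by
  simp only [PySem.List.sorted2, PySem.List.sorted]
  refine pv_foldl_insertBy_congr _ _ l ?_ l [] (fun x hx => hx) (fun y hy => by cases hy)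
  intro x hx y hy
  rcases lt_trichotomy y.1 x.1 with hlt | heq | hgt
  · simp [hlt, asymm hlt]
  · have : y = x := hn y hy x hx heq
    subst this
    simp
  · simp [hgt, asymm hgt]

-- B's max2? really returns a lexicographic maximum
theorem pv_max2?_spec {α : Type} (k1 : α → Nat) (k2 : α → String) (xs : List α) (m : α)
    (h : PySem.List.max2? xs k1 k2 = some m) :
    m ∈ xs ∧ ∀ y ∈ xs, ¬ (k1 m < k1 y ∨ (¬ k1 y < k1 m ∧ k2 m < k2 y)) := by
  -- the loop's comparison, as a strict lexicographic order
  have hlex : ∀ a c : α, (decide (k1 a < k1 c) || (!decide (k1 c < k1 a) && decide (k2 a < k2 c))) = true ↔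
      (k1 a < k1 c ∨ (k1 a = k1 c ∧ k2 a < k2 c)) := by
    intro a c
    rcases lt_trichotomy (k1 a) (k1 c) with h | h | h
    · simp [h, asymm h]
    · simp [h]
    · simp [h, asymm h, (ne_of_gt h)]
  have htrans : ∀ a c e : α,
      (k1 a < k1 c ∨ (k1 a = k1 c ∧ k2 a < k2 c)) →
      (k1 c < k1 e ∨ (k1 c = k1 e ∧ k2 c < k2 e)) →
      (k1 a < k1 e ∨ (k1 a = k1 e ∧ k2 a < k2 e)) := by
    intro a c e h1 h2
    rcases h1 with h1 | ⟨h1, h1'⟩ <;> rcases h2 with h2 | ⟨h2, h2'⟩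
    · exact Or.inl (lt_trans h1 h2)
    · exact Or.inl (h2 ▸ h1)
    · exact Or.inl (h1 ▸ h2)
    · exact Or.inr ⟨h1.trans h2, lt_trans h1' h2'⟩
  have key : ∀ (l : List α) (m0 m' : α),
      l.foldl (pvMaxStep k1 k2) (some m0) = some m' →
      (m' = m0 ∨ m' ∈ l) ∧ ¬ (k1 m' < k1 m0 ∨ (k1 m' = k1 m0 ∧ k2 m' < k2 m0)) ∧
        ∀ y ∈ l, ¬ (k1 m' < k1 y ∨ (k1 m' = k1 y ∧ k2 m' < k2 y)) := by
    intro l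
    induction l with
    | nil =>
        intro m0 m' h
        have : m' = m0 := by simpa using h.symm
        subst this
        exact ⟨Or.inl rfl, by simp, by simp⟩
    | cons x l ih =>
        intro m0 m' h
        rw [List.foldl_cons] at h
        by_cases hc : (decide (k1 m0 < k1 x) || (!decide (k1 x < k1 m0) && decide (k2 m0 < k2 x))) = true
        · simp only [pvMaxStep, hc, if_true] at h
          obtain ⟨hmem, hnx, hall⟩ := ih x m' h
          have hm0x : k1 m0 < k1 x ∨ (k1 m0 = k1 x ∧ k2 m0 < k2 x) := (hlex m0 x).mp hc
          have hnm0 : ¬ (k1 m' < k1 m0 ∨ (k1 m' = k1 m0 ∧ k2 m' < k2 m0)) :=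
            fun hcon => hnx (htrans _ _ _ hcon hm0x)
          refine ⟨Or.inr ?_, hnm0, fun y hy => ?_⟩
          · rcases hmem with rfl | hmem
            · exact List.mem_cons_self
            · exact List.mem_cons_of_mem _ hmem
          · rcases List.mem_cons.mp hy with rfl | hy
            · exact hnx
            · exact hall y hy
        · simp only [pvMaxStep, hc] at h
          obtain ⟨hmem, hn0, hall⟩ := ih m0 m' h
          have hnx : ¬ (k1 m' < k1 x ∨ (k1 m' = k1 x ∧ k2 m' < k2 x)) := by
            intro hcon
            have hxm0 : ¬ (k1 m0 < k1 x ∨ (k1 m0 = k1 x ∧ k2 m0 < k2 x)) :=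
              fun hh => hc ((hlex m0 x).mpr hh)
            -- from ¬ m' < m0 and m' < x derive m0 < x
            rcases hcon with hcon | ⟨hcon, hcon'⟩
            · rcases lt_trichotomy (k1 m0) (k1 m') with ha | ha | ha
              · exact hxm0 (Or.inl (lt_trans ha hcon))
              · exact hxm0 (Or.inl (ha ▸ hcon))
              · exact hn0 (Or.inl ha)
            · rcases lt_trichotomy (k1 m0) (k1 m') with ha | ha | ha
              · exact hxm0 (Or.inl (hcon ▸ ha))
              · rcases lt_trichotomy (k2 m0) (k2 m') with hb | hb | hb
                · exact hxm0 (Or.inr ⟨ha.trans hcon, lt_trans hb hcon'⟩)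
                · exact hxm0 (Or.inr ⟨ha.trans hcon, hb ▸ hcon'⟩)
                · exact hn0 (Or.inr ⟨ha.symm, hb⟩)
              · exact hn0 (Or.inl ha)
          refine ⟨?_, hn0, fun y hy => ?_⟩
          · rcases hmem with rfl | hmem
            · exact Or.inl rfl
            · exact Or.inr (List.mem_cons_of_mem _ hmem)
          · rcases List.mem_cons.mp hy with rfl | hy
            · exact hnx
            · exact hall y hy
    -- conclude
  cases xs with
  | nil => simp [PySem.List.max2?] at h
  | cons x xs =>
      have h' : xs.foldl (pvMaxStep k1 k2) (some x) = some m := h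
      obtain ⟨hmem, hn0, hall⟩ := key xs x m h'
      refine ⟨?_, ?_⟩
      · rcases hmem with rfl | hmem
        · exact List.mem_cons_self
        · exact List.mem_cons_of_mem _ hmem
      intro y hy
      have : ¬ (k1 m < k1 y ∨ (k1 m = k1 y ∧ k2 m < k2 y)) := by
        rcases List.mem_cons.mp hy with rfl | hy
        · exact hn0
        · exact hall y hy
      intro hcon
      apply this
      rcases hcon with hcon | ⟨hcon, hcon'⟩
      · exact Or.inl hcon
      · rcases lt_trichotomy (k1 m) (k1 y) with ha | ha | ha
        · exact Or.inl ha
        · exact Or.inr ⟨ha, hcon'⟩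
        · exact absurd ha hcon

theorem pv_max2?_eq_none_iff {α : Type} (k1 : α → Nat) (k2 : α → String) (xs : List α) :
    PySem.List.max2? xs k1 k2 = none ↔ xs = [] := by
  cases xs with
  | nil => simp [PySem.List.max2?]
  | cons x xs =>
      simp only [List.cons_ne_nil, iff_false]
      have key : ∀ (l : List α) (m0 : α), l.foldl (pvMaxStep k1 k2) (some m0) ≠ none := by
        intro l
        induction l with
        | nil => intro m0 h; cases h
        | cons y l ih =>
            intro m0
            rw [List.foldl_cons]
            simp only [pvMaxStep]
            split <;> apply ih
      intro h
      exact key xs x h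

-- shared-shape facts between the two dicts
theorem pv_rel_contains (d : PySem.Dict String Int) (g : PySem.Dict String (List String))
    (h : d.items = pvMapLen g.items) (e : String) : d.contains e = g.contains e := by
  simp only [PySem.Dict.contains, h, pvMapLen, List.any_map]
  rfl

theorem pv_rel_getD (d : PySem.Dict String Int) (g : PySem.Dict String (List String))
    (h : d.items = pvMapLen g.items) (e : String) :
    d.getD e 0 = ((g.getD e []).length : Int) := by
  simp only [PySem.Dict.getD, PySem.Dict.get?, h, pvMapLen, List.find?_map]
  have hcomp : ((fun p : String × Int => p.1 == e) ∘
      (fun p : String × List String => (p.1, (p.2.length : Int)))) = fun p => p.1 == e := rfl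
  rw [hcomp]
  cases g.items.find? (fun p => p.1 == e) <;> simp

theorem pv_map_id_of_not_contains {ν : Type} (d : PySem.Dict String ν) (e : String) (v : ν)
    (hc : d.contains e = false) :
    d.items.map (fun p => if (p.1 == e) = true then (e, v) else p) = d.items := by
  have h : ∀ p ∈ d.items, (p.1 == e) = false := by
    simpa [PySem.Dict.contains, List.any_eq_false] using hc
  calc d.items.map (fun p => if (p.1 == e) = true then (e, v) else p)
      = d.items.map id := List.map_congr_left (fun p hp => by simp [h p hp])
    _ = d.items := List.map_id _

-- one word of the loop: A's counting step tracks B's grouping step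
theorem pv_dict_step (d : PySem.Dict String Int) (g : PySem.Dict String (List String))
    (h : d.items = pvMapLen g.items) (w : String) :
    ((if d.contains (pvEnd3 w) then d else d.insert (pvEnd3 w) 0).modify (pvEnd3 w) 0 (· + 1)).items
      = pvMapLen (g.modify (pvEnd3 w) [] (· ++ [w])).items := by
  by_cases hc : g.contains (pvEnd3 w) = true
  · have hcd : d.contains (pvEnd3 w) = true := (pv_rel_contains d g h (pvEnd3 w)).trans hc
    simp only [hcd, if_true, PySem.Dict.modify]
    rw [PySem.Dict.items_insert_of_contains _ _ hcd, PySem.Dict.items_insert_of_contains _ _ hc]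
    simp only [h, pvMapLen, List.map_map]
    apply List.map_congr_left
    intro p hp
    by_cases hpe : (p.1 == pvEnd3 w) = true
    · simp [Function.comp, hpe, pv_rel_getD d g h (pvEnd3 w)]
    · simp [Function.comp, hpe]
  · have hc' : g.contains (pvEnd3 w) = false := by simpa using hc
    have hcd : d.contains (pvEnd3 w) = false := by
      rw [pv_rel_contains d g h (pvEnd3 w)]; exact hc'
    simp only [hcd, Bool.false_eq_true, if_false, PySem.Dict.modify]
    have hins : (d.insert (pvEnd3 w) 0).contains (pvEnd3 w) = true := by
      simp [PySem.Dict.contains, PySem.Dict.items_insert_of_not_contains _ _ hcd]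
    rw [PySem.Dict.items_insert_of_contains _ _ hins,
      PySem.Dict.items_insert_of_not_contains _ _ hcd,
      PySem.Dict.items_insert_of_not_contains _ _ hc',
      PySem.Dict.getD_insert]
    simp only [reduceIte]
    rw [List.map_append, pv_map_id_of_not_contains d _ _ hcd]
    simp [pvMapLen, h, PySem.Dict.getD_of_not_contains g ([] : List String) hc']

theorem pv_dict_rel_aux (u : List String) :
    ∀ (d : PySem.Dict String Int) (g : PySem.Dict String (List String)),
    d.items = pvMapLen g.items →
    (u.foldl (fun d w =>
        if 3 ≤ PySem.Str.len w then
          (if d.contains (pvEnd3 w) then d else d.insert (pvEnd3 w) 0).modify (pvEnd3 w) 0 (· + 1)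
        else d) d).items
      = pvMapLen (u.foldl (fun g w =>
          if 3 ≤ PySem.Str.len w then g.modify (pvEnd3 w) [] (· ++ [w]) else g) g).items := by
  induction u with
  | nil => intro d g h; exact h
  | cons w u ih =>
      intro d g h
      simp only [List.foldl_cons]
      by_cases hw : 3 ≤ PySem.Str.len w
      · simp only [hw, if_true]
        exact ih _ _ (pv_dict_step d g h w)
      · simp only [hw, if_false]
        exact ih _ _ h

-- A's count dict is B's grouping dict with every group replaced by its size
theorem pv_dict_rel (u : List String) :
    (popularDictA u).items = pvMapLen (popularGroups u).items := by
  exact pv_dict_rel_aux u PySem.Dict.empty PySem.Dict.empty rfl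

-- B's loop, re-indexed over (ending, word) pairs
theorem pv_groups_rewrite (u : List String) :
    popularGroups u =
      ((u.filter (fun w => decide (3 ≤ PySem.Str.len w))).map (fun w => (pvEnd3 w, w))).foldl
        (fun g p => g.modify p.1 [] (· ++ [p.2])) PySem.Dict.empty := by
  rw [List.foldl_map, List.foldl_filter]
  simp only [popularGroups, decide_eq_true_eq]

-- keys of the grouping dict are distinct
theorem pv_groups_nodup (u : List String) :
    ((popularGroups u).items.map (fun p => p.1)).Nodup := by
  have h := PySem.Dict.nodup_keys_foldl_modify_key
    ((u.filter (fun w => decide (3 ≤ PySem.Str.len w))).map (fun w => (pvEnd3 w, w)))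
    (fun p => p.1) ([] : List String) (fun _ p => (fun v => v ++ [p.2])) PySem.Dict.empty
    (by simp [PySem.Dict.keys_empty])
  rw [pv_groups_rewrite]
  simpa [PySem.Dict.keys] using h

theorem pv_groups_getD (u : List String) (e : String) :
    (popularGroups u).getD e [] =
      u.filter (fun w => (pvEnd3 w == e) && decide (3 ≤ PySem.Str.len w)) := by
  rw [pv_groups_rewrite, PySem.Dict.getD_foldl_modify_append]
  have hc1 : ((fun p : String × String => p.1 == e) ∘ fun w => (pvEnd3 w, w)) =
      fun w => pvEnd3 w == e := rfl
  rw [List.filter_map, hc1, List.map_map]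
  have hc2 : ((fun x : String × String => x.2) ∘ fun w => (pvEnd3 w, w)) = id := rfl
  rw [hc2, List.map_id, List.filter_filter]
  simp

-- every group of popularGroups u is the filter of u by its ending
theorem pv_groups_val (u : List String) :
    ∀ p ∈ (popularGroups u).items,
      p.2 = u.filter (fun w => (pvEnd3 w == p.1) && decide (3 ≤ PySem.Str.len w)) := by
  intro p hp
  have hnd : (popularGroups u).keys.Nodup := by
    simpa [PySem.Dict.keys] using pv_groups_nodup u
  have hmem : (p.1, p.2) ∈ (popularGroups u).items := by simpa using hp
  have := PySem.Dict.getD_of_mem_items (popularGroups u) hmem hnd []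
  rw [← this, pv_groups_getD]

-- pvEnd3 as a drop
theorem pv_end3_toList (w : String) :
    (pvEnd3 w).toList = w.toList.drop (w.toList.length - 3) := by
  simp only [pvEnd3, PySem.Str.toList_slice, PySem.Chars.slice_eq_listSlice]
  exact PySem.List.slice_from_neg_ofNat _ 3 (by norm_num)

-- every key of the grouping dict has exactly 3 characters
theorem pv_groups_key_len (u : List String) :
    ∀ p ∈ (popularGroups u).items, p.1.toList.length = 3 := by
  intro p hp
  have hk : p.1 ∈ (popularGroups u).keys := by
    simp only [PySem.Dict.keys]
    exact List.mem_map_of_mem hp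
  rw [pv_groups_rewrite] at hk
  have hkeys := PySem.Dict.keys_foldl_modify_key
    ((u.filter (fun w => decide (3 ≤ PySem.Str.len w))).map (fun w => (pvEnd3 w, w)))
    (fun p => p.1) ([] : List String) (fun _ p => (fun v => v ++ [p.2])) PySem.Dict.empty
  simp only [hkeys, List.map_map] at hk
  have hup : PySem.Set.update (PySem.Dict.empty (κ := String) (ν := List String)).keys
      ((u.filter (fun w => decide (3 ≤ PySem.Str.len w))).map
        ((fun p : String × String => p.1) ∘ (fun w => (pvEnd3 w, w)))) =
      PySem.Set.ofList ((u.filter (fun w => decide (3 ≤ PySem.Str.len w))).map pvEnd3) := by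
    rw [PySem.Set.ofList_eq_foldl]
    rfl
  rw [hup] at hk
  rw [PySem.Set.mem_ofList] at hk
  obtain ⟨w, hw, hwe⟩ := List.mem_map.mp hk
  have hw3 : 3 ≤ w.toList.length := by
    have := List.of_mem_filter hw
    simp only [decide_eq_true_eq, PySem.Str.len] at this
    exact_mod_cast this
  rw [← hwe, pv_end3_toList, List.length_drop]
  omega

-- dedup commutes with filter
theorem pv_ofList_filter (q : String → Bool) (xs : List String) :
    PySem.Set.ofList (xs.filter q) = (PySem.Set.ofList xs).filter q := by
  have aux : ∀ (ys : List String) (s : List String),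
      (ys.filter q).foldl PySem.Set.add (s.filter q) = (ys.foldl PySem.Set.add s).filter q := by
    intro ys
    induction ys with
    | nil => intro s; rfl
    | cons w ys ih =>
        intro s
        by_cases hq : q w = true
        · have hstep : (PySem.Set.add s w).filter q = PySem.Set.add (s.filter q) w := by
            simp only [PySem.Set.add, PySem.Set.contains, List.contains_eq_mem]
            by_cases hm : w ∈ s
            · simp [hm, hq]
            · have hm' : w ∉ s.filter q := fun hcon => hm (List.mem_of_mem_filter hcon)
              simp [hm, hm', hq]
          simp only [List.filter_cons, hq, if_true, List.foldl_cons]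
          rw [← hstep]
          exact ih (PySem.Set.add s w)
        · have hq' : q w = false := by simpa using hq
          have hstep : (PySem.Set.add s w).filter q = s.filter q := by
            simp only [PySem.Set.add]
            split
            · rfl
            · simp [List.filter_append, hq']
          simp only [List.filter_cons, hq', List.foldl_cons]
          rw [← hstep]
          exact ih (PySem.Set.add s w)
  rw [PySem.Set.ofList_eq_foldl, PySem.Set.ofList_eq_foldl]
  have := aux xs []
  simpa using this

-- pointwise equal step functions give equal folds
theorem pv_foldl_congr {α β : Type} (f g : β → α → β) (h : ∀ b a, f b a = g b a)
    (l : List α) (init : β) : l.foldl f init = l.foldl g init := by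
  have : f = g := funext (fun b => funext (fun a => h b a))
  rw [this]

-- A's collection loop is dedup-of-filter
theorem pv_collect (ws : List String) (e : String) :
    ws.foldl (fun ret w => if (pvEnd3 w == e) && !ret.contains w then ret ++ [w] else ret) [] =
      PySem.Set.ofList (ws.filter (fun w => pvEnd3 w == e)) := by
  rw [PySem.Set.ofList_eq_foldl, List.foldl_filter]
  apply pv_foldl_congr
  intro ret w
  simp only [PySem.Set.add, PySem.Set.contains]
  by_cases hq : (pvEnd3 w == e) = true
  · simp [hq]
  · have hq' : (pvEnd3 w == e) = false := by simpa using hq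
    simp [hq']

-- the assembled equivalence
theorem pv_main (phrase : String) : popular phrase = popular_alt phrase := by
  simp only [popular, popular_alt]
  rcases hGI : PySem.List.max2? (popularGroups (PySem.Set.ofList (pvWords phrase))).items
      (fun p => p.2.length) (fun p => p.1) with _ | m
  · -- no 3-letter word: both dicts are empty and both sides return []
    have hnil : (popularGroups (PySem.Set.ofList (pvWords phrase))).items = [] :=
      (pv_max2?_eq_none_iff _ _ _).mp hGI
    have hDnil : (popularDictA (PySem.Set.ofList (pvWords phrase))).items = [] := by
      rw [pv_dict_rel, hnil]; rfl
    rw [hDnil]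
    rfl
  · have hrel := pv_dict_rel (PySem.Set.ofList (pvWords phrase))
    have hndG := pv_groups_nodup (PySem.Set.ofList (pvWords phrase))
    obtain ⟨hmem, hmax⟩ := pv_max2?_spec _ _ _ _ hGI
    have hndD : ((popularDictA (PySem.Set.ofList (pvWords phrase))).items.map
        (fun p => p.1)).Nodup := by
      rw [hrel]
      have hcomp : ((fun p : String × Int => p.1) ∘
          (fun p : String × List String => (p.1, (p.2.length : Int)))) = fun p => p.1 := rfl
      simpa [pvMapLen, List.map_map, hcomp] using hndG
    have hinjD := List.inj_on_of_nodup_map hndD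
    have hsorted2 := pv_sorted2_eq_sorted_fst
      (popularDictA (PySem.Set.ofList (pvWords phrase))).items
      (fun x hx y hy hxy => hinjD hx hy hxy)
    rw [hsorted2]
    -- the sorted-by-fst-descending intermediate list
    have hpairle := PySem.List.sorted_pairwise_rev
      (popularDictA (PySem.Set.ofList (pvWords phrase))).items (fun x : String × Int => x.1)
    have hperm := PySem.List.sorted_perm
      (popularDictA (PySem.Set.ofList (pvWords phrase))).items (fun x : String × Int => x.1) true
    have hndInner : ((PySem.List.sorted
        (popularDictA (PySem.Set.ofList (pvWords phrase))).items
        (fun x : String × Int => x.1) true).map (fun p => p.1)).Nodup :=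
      ((hperm.map (fun p => p.1)).nodup_iff).mpr hndD
    have hpairlt : (PySem.List.sorted
        (popularDictA (PySem.Set.ofList (pvWords phrase))).items
        (fun x : String × Int => x.1) true).Pairwise (fun a b => b.1 < a.1) := by
      have hne := List.pairwise_map.mp hndInner
      exact (hpairle.and hne).imp (fun {a b} h => lt_of_le_of_ne h.1 (fun heq => h.2 heq.symm))
    -- the unique (count, ending)-maximal item, on the A side
    have hqmem : ((m.1, (m.2.length : Int)) : String × Int) ∈
        (popularDictA (PySem.Set.ofList (pvWords phrase))).items := by
      rw [hrel]
      exact List.mem_map_of_mem hmem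
    have hstrictA : ∀ q ∈ (popularDictA (PySem.Set.ofList (pvWords phrase))).items,
        q ≠ ((m.1, (m.2.length : Int)) : String × Int) →
        (q.2 < (m.2.length : Int) ∨ (q.2 = (m.2.length : Int) ∧ q.1 < m.1)) := by
      intro q hq hne
      rw [hrel] at hq
      obtain ⟨p, hp, rfl⟩ := List.mem_map.mp hq
      have hmx := hmax p hp
      have h1 : ¬ m.2.length < p.2.length := fun hcon => hmx (Or.inl hcon)
      have h2 : ¬ p.2.length < m.2.length → ¬ m.1 < p.1 :=
        fun hb hcon => hmx (Or.inr ⟨hb, hcon⟩)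
      rcases lt_trichotomy p.2.length m.2.length with hlt | heq | hgt
      · exact Or.inl (show ((p.2.length : Int)) < (m.2.length : Int) by exact_mod_cast hlt)
      · refine Or.inr ⟨show ((p.2.length : Int)) = (m.2.length : Int) by exact_mod_cast heq, ?_⟩
        have hnot : ¬ m.1 < p.1 := h2 (by omega)
        have hne1 : p.1 ≠ m.1 := by
          intro hcon
          exact hne (by
            have : p = m := List.inj_on_of_nodup_map hndG hp hmem hcon
            rw [this])
        exact lt_of_le_of_ne (le_of_not_gt hnot) hne1
      · exact absurd hgt h1
    -- the head of A's doubly sorted list is that item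
    obtain ⟨pre, suf, hsplit⟩ := List.append_of_mem
      ((PySem.List.mem_sorted _ (fun x : String × Int => x.1) true _).mpr hqmem)
    have hmin : PySem.List.min? (PySem.List.sorted
        (popularDictA (PySem.Set.ofList (pvWords phrase))).items
        (fun x : String × Int => x.1) true) (fun x => -x.2) =
        some ((m.1, (m.2.length : Int)) : String × Int) := by
      rw [hsplit]
      apply pv_min?_eq_of_strict
      · intro p hp
        have hlt1 : ((m.1, (m.2.length : Int)) : String × Int).1 < p.1 :=
          (List.pairwise_append.mp (hsplit ▸ hpairlt)).2.2 p hp _ List.mem_cons_self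
        have hpD : p ∈ (popularDictA (PySem.Set.ofList (pvWords phrase))).items :=
          hperm.mem_iff.mp (hsplit ▸ List.mem_append_left _ hp)
        have hpne : p ≠ ((m.1, (m.2.length : Int)) : String × Int) := by
          intro hcon
          rw [hcon] at hlt1
          exact lt_irrefl _ hlt1
        rcases hstrictA p hpD hpne with h | ⟨_, h2⟩
        · exact neg_lt_neg h
        · exact absurd h2 (not_lt.mpr (le_of_lt hlt1))
      · intro y hy
        have hyD : y ∈ (popularDictA (PySem.Set.ofList (pvWords phrase))).items :=
          hperm.mem_iff.mp (hsplit ▸ List.mem_append_right _ (List.mem_cons_of_mem _ hy))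
        by_cases hye : y = ((m.1, (m.2.length : Int)) : String × Int)
        · rw [hye]
        · rcases hstrictA y hyD hye with h | ⟨h1, _⟩
          · exact neg_le_neg (le_of_lt h)
          · exact neg_le_neg (le_of_eq h1)
    have hhead : (PySem.List.sorted (PySem.List.sorted
        (popularDictA (PySem.Set.ofList (pvWords phrase))).items
        (fun x : String × Int => x.1) true) (fun x : String × Int => -x.2)).head? =
        some ((m.1, (m.2.length : Int)) : String × Int) := by
      rw [pv_head?_sorted_eq_min?]
      exact hmin
    rcases hl : PySem.List.sorted (PySem.List.sorted
        (popularDictA (PySem.Set.ofList (pvWords phrase))).items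
        (fun x : String × Int => x.1) true) (fun x : String × Int => -x.2) with _ | ⟨a, t⟩
    · rw [hl] at hhead
      cases hhead
    · rw [hl] at hhead
      have ha : a = ((m.1, (m.2.length : Int)) : String × Int) := by
        simpa using hhead
      rw [ha]
      -- both sides now name the same ending m.1; compare the word lists
      show PySem.List.sorted ((pvWords phrase).foldl
          (fun ret w => if (pvEnd3 w == m.1) && !ret.contains w then ret ++ [w] else ret) [])
          (fun x => x) = PySem.List.sorted m.2 (fun x => x)
      rw [pv_collect (pvWords phrase) m.1, pv_ofList_filter]
      have hkl := pv_groups_key_len (PySem.Set.ofList (pvWords phrase)) m hmem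
      have hfe : (PySem.Set.ofList (pvWords phrase)).filter (fun w => pvEnd3 w == m.1) =
          (PySem.Set.ofList (pvWords phrase)).filter
            (fun w => (pvEnd3 w == m.1) && decide (3 ≤ PySem.Str.len w)) := by
        apply List.filter_congr
        intro w _
        by_cases hq : (pvEnd3 w == m.1) = true
        · have hwe : pvEnd3 w = m.1 := eq_of_beq hq
          have hlen : (pvEnd3 w).toList.length = 3 := by rw [hwe]; exact hkl
          rw [pv_end3_toList, List.length_drop] at hlen
          have h3 : 3 ≤ w.length := by
            rw [← String.length_toList]
            omega
          simp [hq, h3]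
        · have hq' : (pvEnd3 w == m.1) = false := by simpa using hq
          simp [hq']
      rw [hfe, ← pv_groups_val (PySem.Set.ofList (pvWords phrase)) m hmem]

-- ===== VERDICT (by name: the statement is the Claim_ definition above) =====
theorem popular_spec : Claim_equal_popular := by
  intro phrase _
  unfold Spec_popular
  exact pv_main phrase
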